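-- pv_equiv track=rewrite | github.com/yuvalwalter84/yuval01 | modules/job_matcher.py | check_seniority_match
-- ===== SOURCE A (Python) =====
-- from typing import Dict, List, Tuple, Optional
--
-- def check_seniority_match(
--
--     resume_data: Dict[str, any],
--     job_description: str,
--     job_title: str
-- ) -> Tuple[float, str]:
--     """Check if seniority level matches and return penalty/adjustment.
--
--     Args:
--         resume_data: Parsed resume data
--         job_description: Job description text
--         job_title: Job title
--
--     Returns:
--         Tuple of (penalty_score, explanation)
--     """
--     resume_seniority = resume_data.get("seniority_level", "mid").lower()
--     resume_years = resume_data.get("years_experience", 0)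
--
--     # Extract job level from title and description
--     text_lower = (job_title + " " + job_description).lower()
--
--     # Determine job level
--     if any(term in text_lower for term in ["junior", "jr", "entry", "associate", "intern"]):
--         job_level = "junior"
--     elif any(term in text_lower for term in ["senior", "sr", "lead", "principal", "staff", "architect"]):
--         job_level = "senior"
--     else:
--         job_level = "mid"
--
--     # Calculate penalty
--     penalty = 0
--     explanation = ""
--
--     # Seniority mapping
--     seniority_map = {"junior": 1, "mid": 2, "senior": 3, "lead": 4, "principal": 5}
--     resume_level = seniority_map.get(resume_seniority, 2)
--     job_level_num = seniority_map.get(job_level, 2)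
--
--     level_diff = resume_level - job_level_num
--
--     if level_diff < -1:  # Resume is much lower than job
--         penalty = -15
--         explanation = f"Major seniority mismatch: You're {resume_seniority} but job requires {job_level}"
--     elif level_diff == -1:  # Resume is slightly lower
--         penalty = -5
--         explanation = f"Minor seniority gap: You're {resume_seniority} but job prefers {job_level}"
--     elif level_diff > 1:  # Resume is much higher than job
--         penalty = -10
--         explanation = f"Overqualified: You're {resume_seniority} but job is {job_level}"
--     elif level_diff == 1:  # Resume is slightly higher
--         penalty = 0
--         explanation = f"Good match: You're {resume_seniority} for {job_level} role"
--     else:  # Perfect match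
--         penalty = 5
--         explanation = f"Perfect seniority match: {resume_seniority} for {job_level} role"
--
--     return penalty, explanation
-- ===== SOURCE B (Python) =====
-- def check_seniority_match(resume_data, job_description, job_title):
--     """Different decomposition: a single flattened first-match scan over
--     (term, level) pairs picks the job level, and the outcome comes from a
--     full 2D table keyed by (resume_level, job_level_num) -- no level_diff
--     arithmetic, no if/elif chains; templates filled by str.format."""
--     resume_seniority = resume_data.get("seniority_level", "mid").lower()
--     text = (job_title + " " + job_description).lower()
--
--     job_level = "mid"
--     for term, lvl in [
--         ("junior", "junior"), ("jr", "junior"), ("entry", "junior"),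
--         ("associate", "junior"), ("intern", "junior"),
--         ("senior", "senior"), ("sr", "senior"), ("lead", "senior"),
--         ("principal", "senior"), ("staff", "senior"), ("architect", "senior"),
--     ]:
--         if term in text:
--             job_level = lvl
--             break
--
--     levels = {"junior": 1, "mid": 2, "senior": 3, "lead": 4, "principal": 5}
--     r = levels.get(resume_seniority, 2)
--     j = levels[job_level]
--
--     MAJOR = (-15, "Major seniority mismatch: You're {r} but job requires {j}")
--     MINOR = (-5, "Minor seniority gap: You're {r} but job prefers {j}")
--     OVER = (-10, "Overqualified: You're {r} but job is {j}")
--     GOOD = (0, "Good match: You're {r} for {j} role")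
--     PERFECT = (5, "Perfect seniority match: {r} for {j} role")
--     CELLS = {
--         (1, 1): PERFECT, (1, 2): MINOR, (1, 3): MAJOR,
--         (2, 1): GOOD, (2, 2): PERFECT, (2, 3): MINOR,
--         (3, 1): OVER, (3, 2): GOOD, (3, 3): PERFECT,
--         (4, 1): OVER, (4, 2): OVER, (4, 3): GOOD,
--         (5, 1): OVER, (5, 2): OVER, (5, 3): OVER,
--     }
--     penalty, template = CELLS[(r, j)]
--     return penalty, template.format(r=resume_seniority, j=job_level)
-- ===== Notes on version B (the rewrite author's own statement) =====
-- stated objective: alternative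
-- what changed: Job-level detection becomes a single flattened first-match scan over (term, level) pairs instead of two grouped any() tests, and the level_diff subtraction plus five-way if/elif chain disappear entirely in favour of a full 2D outcome table keyed by (resume_level, job_level_num) whose str.format templates produce the explanation.
import Mathlib
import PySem

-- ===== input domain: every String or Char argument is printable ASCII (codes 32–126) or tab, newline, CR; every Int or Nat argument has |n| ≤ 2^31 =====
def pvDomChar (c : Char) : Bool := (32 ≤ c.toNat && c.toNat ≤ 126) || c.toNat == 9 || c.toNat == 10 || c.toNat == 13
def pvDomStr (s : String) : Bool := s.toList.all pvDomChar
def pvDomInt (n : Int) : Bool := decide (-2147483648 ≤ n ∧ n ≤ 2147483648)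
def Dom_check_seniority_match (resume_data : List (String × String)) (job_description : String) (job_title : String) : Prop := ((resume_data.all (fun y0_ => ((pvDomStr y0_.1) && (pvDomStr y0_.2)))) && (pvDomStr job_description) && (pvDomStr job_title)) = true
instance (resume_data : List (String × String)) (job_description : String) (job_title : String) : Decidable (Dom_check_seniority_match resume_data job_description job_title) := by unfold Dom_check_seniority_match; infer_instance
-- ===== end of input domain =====

-- B replaces A's grouped any()-detection and diff-based if/elif chain by a single flattened
-- first-match (term, level) scan and a full 2D outcome table keyed by (resume_level, job_level_num)
-- with str.format templates; objective: alternative decomposition. Return values proved equal on Dom.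

-- ===== PORT A =====
-- literal transliteration of Source A (resume_years is read but never used in A and its int
-- default does not fit the str-valued dict; the dead binding is omitted)
def check_seniority_match (resume_data : List (String × String)) (job_description : String) (job_title : String) : Int × String :=
  let resume_seniority := PySem.Str.lower (PySem.Dict.getD (PySem.Dict.mk resume_data) "seniority_level" "mid")
  let text_lower := PySem.Str.lower (job_title ++ " " ++ job_description)
  let job_level :=
    if ["junior", "jr", "entry", "associate", "intern"].any (fun term => PySem.Str.isIn term text_lower) then "junior"
    else if ["senior", "sr", "lead", "principal", "staff", "architect"].any (fun term => PySem.Str.isIn term text_lower) then "senior"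
    else "mid"
  let seniority_map := PySem.Dict.ofList [("junior", (1 : Int)), ("mid", 2), ("senior", 3), ("lead", 4), ("principal", 5)]
  let resume_level := seniority_map.getD resume_seniority 2
  let job_level_num := seniority_map.getD job_level 2
  let level_diff := resume_level - job_level_num
  if level_diff < -1 then
    (-15, "Major seniority mismatch: You're " ++ resume_seniority ++ " but job requires " ++ job_level)
  else if level_diff = -1 then
    (-5, "Minor seniority gap: You're " ++ resume_seniority ++ " but job prefers " ++ job_level)
  else if level_diff > 1 then
    (-10, "Overqualified: You're " ++ resume_seniority ++ " but job is " ++ job_level)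
  else if level_diff = 1 then
    (0, "Good match: You're " ++ resume_seniority ++ " for " ++ job_level ++ " role")
  else
    (5, "Perfect seniority match: " ++ resume_seniority ++ " for " ++ job_level ++ " role")

-- ===== PORT B =====
-- the 'for term, lvl in …: if term in text: job_level = lvl; break' loop of Source B
def pvScanLevel (text : String) : List (String × String) → String
  | [] => "mid"
  | (term, lvl) :: rest => if PySem.Str.isIn term text then lvl else pvScanLevel text rest

-- template.format(r=…, j=…) for templates whose only replacement fields are {r} and {j}
-- (exact for Source B's literal templates: one pass over the template, values inserted verbatim)
def pvFormatRJ (rs jl : List Char) : List Char → List Char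
  | '{' :: 'r' :: '}' :: rest => rs ++ pvFormatRJ rs jl rest
  | '{' :: 'j' :: '}' :: rest => jl ++ pvFormatRJ rs jl rest
  | c :: rest => c :: pvFormatRJ rs jl rest
  | [] => []

-- literal transliteration of Source B; levels[job_level] can never raise (job_level is always a
-- key), so the getD default 0 is unreachable, and so is the CELLS default (0, "")
def check_seniority_match_alt (resume_data : List (String × String)) (job_description : String) (job_title : String) : Int × String :=
  let resume_seniority := PySem.Str.lower (PySem.Dict.getD (PySem.Dict.mk resume_data) "seniority_level" "mid")
  let text := PySem.Str.lower (job_title ++ " " ++ job_description)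
  let job_level := pvScanLevel text
    [("junior", "junior"), ("jr", "junior"), ("entry", "junior"),
     ("associate", "junior"), ("intern", "junior"),
     ("senior", "senior"), ("sr", "senior"), ("lead", "senior"),
     ("principal", "senior"), ("staff", "senior"), ("architect", "senior")]
  let levels := PySem.Dict.ofList [("junior", (1 : Int)), ("mid", 2), ("senior", 3), ("lead", 4), ("principal", 5)]
  let r := levels.getD resume_seniority 2
  let j := (levels.get? job_level).getD 0
  let major : Int × String := (-15, "Major seniority mismatch: You're {r} but job requires {j}")
  let minor : Int × String := (-5, "Minor seniority gap: You're {r} but job prefers {j}")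
  let ovr : Int × String := (-10, "Overqualified: You're {r} but job is {j}")
  let good : Int × String := (0, "Good match: You're {r} for {j} role")
  let perfect : Int × String := (5, "Perfect seniority match: {r} for {j} role")
  let cells : PySem.Dict (Int × Int) (Int × String) := PySem.Dict.ofList
    [((1, 1), perfect), ((1, 2), minor), ((1, 3), major),
     ((2, 1), good), ((2, 2), perfect), ((2, 3), minor),
     ((3, 1), ovr), ((3, 2), good), ((3, 3), perfect),
     ((4, 1), ovr), ((4, 2), ovr), ((4, 3), good),
     ((5, 1), ovr), ((5, 2), ovr), ((5, 3), ovr)]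
  let cell := cells.getD (r, j) (0, "")
  (cell.1, String.ofList (pvFormatRJ resume_seniority.toList job_level.toList cell.2.toList))

-- ===== PRECONDITION & SPEC =====
def Spec_check_seniority_match (resume_data : List (String × String)) (job_description : String) (job_title : String) (out : Int × String) : Prop := out = check_seniority_match_alt resume_data job_description job_title
instance (resume_data : List (String × String)) (job_description : String) (job_title : String) (out : Int × String) : Decidable (Spec_check_seniority_match resume_data job_description job_title out) := by unfold Spec_check_seniority_match; infer_instance

-- ===== CLAIM (what is proved, stated in full; the proofs are below) =====
def Claim_equal_check_seniority_match : Prop := ∀ (resume_data : List (String × String)) (job_description : String) (job_title : String), Dom_check_seniority_match resume_data job_description job_title → Spec_check_seniority_match resume_data job_description job_title (check_seniority_match resume_data job_description job_title)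

-- ===== LEMMAS AND PROOFS =====
-- B's flattened scan over a group of pairs sharing one level equals A's grouped any()
theorem pvScanLevel_group (text l : String) (ts : List String) (rest : List (String × String)) :
    pvScanLevel text (ts.map (fun t => (t, l)) ++ rest) =
      if ts.any (fun t => PySem.Str.isIn t text) then l else pvScanLevel text rest := by
  induction ts with
  | nil => simp
  | cons t ts ih =>
      simp only [List.map_cons, List.cons_append, pvScanLevel, List.any_cons]
      by_cases h : PySem.Str.isIn t text = true <;>
        simp only [h, Bool.true_or, Bool.false_or, if_true, ih, Bool.false_eq_true, if_false]

-- B's concrete 11-pair scan equals A's two grouped tests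
theorem pvScan_eq (text : String) :
    pvScanLevel text
      [("junior", "junior"), ("jr", "junior"), ("entry", "junior"),
       ("associate", "junior"), ("intern", "junior"),
       ("senior", "senior"), ("sr", "senior"), ("lead", "senior"),
       ("principal", "senior"), ("staff", "senior"), ("architect", "senior")] =
      (if ["junior", "jr", "entry", "associate", "intern"].any (fun term => PySem.Str.isIn term text) then "junior"
       else if ["senior", "sr", "lead", "principal", "staff", "architect"].any (fun term => PySem.Str.isIn term text) then "senior"
       else "mid") := by
  rw [show [(("junior" : String), ("junior" : String)), ("jr", "junior"), ("entry", "junior"),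
        ("associate", "junior"), ("intern", "junior"),
        ("senior", "senior"), ("sr", "senior"), ("lead", "senior"),
        ("principal", "senior"), ("staff", "senior"), ("architect", "senior")] =
      (["junior", "jr", "entry", "associate", "intern"].map (fun t => (t, "junior"))) ++
      ((["senior", "sr", "lead", "principal", "staff", "architect"].map (fun t => (t, "senior"))) ++ []) from rfl,
    pvScanLevel_group, pvScanLevel_group]
  rfl

-- the seniority_map lookup for an arbitrary (lowercased) resume string takes one of five values
theorem pv_rl_cases (rs : String) :
    PySem.Dict.getD (PySem.Dict.ofList [("junior", (1 : Int)), ("mid", 2), ("senior", 3), ("lead", 4), ("principal", 5)]) rs 2 = 1 ∨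
    PySem.Dict.getD (PySem.Dict.ofList [("junior", (1 : Int)), ("mid", 2), ("senior", 3), ("lead", 4), ("principal", 5)]) rs 2 = 2 ∨
    PySem.Dict.getD (PySem.Dict.ofList [("junior", (1 : Int)), ("mid", 2), ("senior", 3), ("lead", 4), ("principal", 5)]) rs 2 = 3 ∨
    PySem.Dict.getD (PySem.Dict.ofList [("junior", (1 : Int)), ("mid", 2), ("senior", 3), ("lead", 4), ("principal", 5)]) rs 2 = 4 ∨
    PySem.Dict.getD (PySem.Dict.ofList [("junior", (1 : Int)), ("mid", 2), ("senior", 3), ("lead", 4), ("principal", 5)]) rs 2 = 5 := by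
  rw [show PySem.Dict.ofList [("junior", (1 : Int)), ("mid", 2), ("senior", 3), ("lead", 4), ("principal", 5)] =
        PySem.Dict.mk [("junior", (1 : Int)), ("mid", 2), ("senior", 3), ("lead", 4), ("principal", 5)] from rfl]
  simp only [PySem.Dict.getD_eq_get?_getD, PySem.Dict.get?_mk_cons]
  split_ifs
  all_goals first
    | decide
    | (simp [PySem.Dict.get?])

-- ===== VERDICT (by name: the statement is the Claim_ definition above) =====
theorem check_seniority_match_spec : Claim_equal_check_seniority_match := by
  intro resume_data job_description job_title _
  unfold Spec_check_seniority_match check_seniority_match check_seniority_match_alt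
  simp only [pvScan_eq]
  cases hJ : ["junior", "jr", "entry", "associate", "intern"].any
      (fun term => PySem.Str.isIn term (PySem.Str.lower (job_title ++ " " ++ job_description))) <;>
  cases hS : ["senior", "sr", "lead", "principal", "staff", "architect"].any
      (fun term => PySem.Str.isIn term (PySem.Str.lower (job_title ++ " " ++ job_description))) <;>
  simp only [Bool.false_eq_true, if_true, if_false] <;>
  rcases pv_rl_cases (PySem.Str.lower (PySem.Dict.getD (PySem.Dict.mk resume_data) "seniority_level" "mid")) with h | h | h | h | h <;>
  rw [h] <;>
  (refine Prod.ext rfl ?_) <;>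
  (apply String.toList_inj.mp) <;>
  rw [show (PySem.Dict.ofList [("junior", (1:Int)), ("mid", 2), ("senior", 3), ("lead", 4), ("principal", 5)]) = PySem.Dict.mk [("junior", (1:Int)), ("mid", 2), ("senior", 3), ("lead", 4), ("principal", 5)] from rfl,
      show (PySem.Dict.ofList
        [(((1:Int), (1:Int)), ((5:Int), "Perfect seniority match: {r} for {j} role")),
         ((1, 2), (-5, "Minor seniority gap: You're {r} but job prefers {j}")),
         ((1, 3), (-15, "Major seniority mismatch: You're {r} but job requires {j}")),
         ((2, 1), (0, "Good match: You're {r} for {j} role")),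
         ((2, 2), (5, "Perfect seniority match: {r} for {j} role")),
         ((2, 3), (-5, "Minor seniority gap: You're {r} but job prefers {j}")),
         ((3, 1), (-10, "Overqualified: You're {r} but job is {j}")),
         ((3, 2), (0, "Good match: You're {r} for {j} role")),
         ((3, 3), (5, "Perfect seniority match: {r} for {j} role")),
         ((4, 1), (-10, "Overqualified: You're {r} but job is {j}")),
         ((4, 2), (-10, "Overqualified: You're {r} but job is {j}")),
         ((4, 3), (0, "Good match: You're {r} for {j} role")),
         ((5, 1), (-10, "Overqualified: You're {r} but job is {j}")),
         ((5, 2), (-10, "Overqualified: You're {r} but job is {j}")),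
         ((5, 3), (-10, "Overqualified: You're {r} but job is {j}"))]) = PySem.Dict.mk
        [(((1:Int), (1:Int)), ((5:Int), "Perfect seniority match: {r} for {j} role")),
         ((1, 2), (-5, "Minor seniority gap: You're {r} but job prefers {j}")),
         ((1, 3), (-15, "Major seniority mismatch: You're {r} but job requires {j}")),
         ((2, 1), (0, "Good match: You're {r} for {j} role")),
         ((2, 2), (5, "Perfect seniority match: {r} for {j} role")),
         ((2, 3), (-5, "Minor seniority gap: You're {r} but job prefers {j}")),
         ((3, 1), (-10, "Overqualified: You're {r} but job is {j}")),
         ((3, 2), (0, "Good match: You're {r} for {j} role")),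
         ((3, 3), (5, "Perfect seniority match: {r} for {j} role")),
         ((4, 1), (-10, "Overqualified: You're {r} but job is {j}")),
         ((4, 2), (-10, "Overqualified: You're {r} but job is {j}")),
         ((4, 3), (0, "Good match: You're {r} for {j} role")),
         ((5, 1), (-10, "Overqualified: You're {r} but job is {j}")),
         ((5, 2), (-10, "Overqualified: You're {r} but job is {j}")),
         ((5, 3), (-10, "Overqualified: You're {r} but job is {j}"))] from rfl] <;>
  simp [PySem.Dict.getD_eq_get?_getD, pvFormatRJ, PySem.Dict.get?]
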